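-- pv_equiv track=rewrite | github.com/codieboomboom/advoco | 2015/day01/solution.py | part1_raw
-- ===== SOURCE A (Python) =====
-- def part1_raw(input: str) -> int:
--     sum = 0
--     for c in input:
--         if c == '(':
--             sum += 1
--         else:
--             sum -= 1
--     return sum
-- ===== SOURCE B (Python) =====
-- def part1_raw(input: str) -> int:
--     # closed form: each '(' contributes +1, every other char -1
--     return 2 * input.count('(') - len(input)
-- ===== Notes on version B (the rewrite author's own statement) =====
-- stated objective: simpler
-- what changed: Replaces the per-character accumulating loop with the closed-form arithmetic 2*count('(') - len(input), since every non-'(' character contributes -1.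
import Mathlib
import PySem

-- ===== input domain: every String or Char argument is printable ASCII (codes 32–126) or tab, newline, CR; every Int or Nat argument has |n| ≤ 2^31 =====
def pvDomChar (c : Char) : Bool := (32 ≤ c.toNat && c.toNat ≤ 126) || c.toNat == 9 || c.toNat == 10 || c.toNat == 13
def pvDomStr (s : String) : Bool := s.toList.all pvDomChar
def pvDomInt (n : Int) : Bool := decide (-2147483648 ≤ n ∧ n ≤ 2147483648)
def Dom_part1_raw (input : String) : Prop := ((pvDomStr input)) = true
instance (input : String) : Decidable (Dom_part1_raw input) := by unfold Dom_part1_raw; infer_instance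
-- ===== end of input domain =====

-- B replaces A's accumulating loop by the closed form 2*count('(') - len(input); objective: simpler.

-- ===== PORT A =====
def part1_raw (input : String) : Int :=
  input.toList.foldl (fun sum c => if c = '(' then sum + 1 else sum - 1) 0

-- ===== PORT B =====
def part1_raw_alt (input : String) : Int :=
  2 * (PySem.Str.count input "(" : Int) - PySem.Str.len input

-- ===== PRECONDITION & SPEC =====
def Spec_part1_raw (input : String) (out : Int) : Prop := out = part1_raw_alt input
instance (input : String) (out : Int) : Decidable (Spec_part1_raw input out) := by unfold Spec_part1_raw; infer_instance

-- ===== CLAIM (what is proved, stated in full; the proofs are below) =====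
def Claim_equal_part1_raw : Prop := ∀ (input : String), Dom_part1_raw input → Spec_part1_raw input (part1_raw input)

-- ===== LEMMAS AND PROOFS =====

theorem count_go_cons (c h : Char) (t : List Char) (acc : Nat) :
    PySem.Chars.count.go [c] (t.length + 1) (h :: t) acc
      = if h = c then PySem.Chars.count.go [c] t.length t (acc + 1)
        else PySem.Chars.count.go [c] t.length t acc := by
  rw [PySem.Chars.count.go]
  by_cases hc : h = c
  · subst hc
    simp [List.isPrefixOf]
  · have hb : (c == h) = false := by simp [Ne.symm hc]
    simp [List.isPrefixOf, hb, hc]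

theorem count_go_single (c : Char) (s : List Char) (acc : Nat) :
    PySem.Chars.count.go [c] s.length s acc = acc + s.count c := by
  induction s generalizing acc with
  | nil => simp [PySem.Chars.count.go]
  | cons h t ih =>
    rw [List.length_cons, count_go_cons, List.count_cons]
    by_cases hc : h = c
    · simp [hc, ih]; omega
    · simp [hc, ih]

theorem chars_count_single (c : Char) (s : List Char) :
    PySem.Chars.count s [c] = s.count c := by
  have : PySem.Chars.count s [c]
      = PySem.Chars.count.go [c] s.length s 0 := by
    rw [PySem.Chars.count]; simp
  rw [this, count_go_single]; omega

theorem foldl_balance (l : List Char) (a : Int) :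
    l.foldl (fun sum c => if c = '(' then sum + 1 else sum - 1) a
      = a + 2 * (l.count '(' : Int) - l.length := by
  induction l generalizing a with
  | nil => simp
  | cons h t ih =>
    by_cases hc : h = '('
    · simp [hc, ih]; ring
    · simp [hc, ih]; ring

-- ===== VERDICT (by name: the statement is the Claim_ definition above) =====
theorem part1_raw_spec : Claim_equal_part1_raw := by
  intro input _
  unfold Spec_part1_raw part1_raw part1_raw_alt
  rw [foldl_balance]
  simp [PySem.Str.count, PySem.Str.len, chars_count_single]
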